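-- pv_equiv track=rewrite | github.com/KashGiannis34/CipherArena | db/codebusters_bot.py | _normalize_keyword
-- ===== SOURCE A (Python) =====
-- def _normalize_keyword(keyword: str) -> str:
--     # Uppercase, remove non A-Z, map J->I, and de-duplicate preserving order
--     seen = set()
--     cleaned = []
--     for ch in keyword.upper():
--         if 'A' <= ch <= 'Z':
--             if ch == 'J':
--                 ch = 'I'
--             if ch not in seen:
--                 seen.add(ch)
--                 cleaned.append(ch)
--     return "".join(cleaned)
-- ===== SOURCE B (Python) =====
-- def _normalize_keyword(keyword: str) -> str:
--     # Normalize the whole string up front (uppercase, fold J into I), then order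
--     # the distinct in-range letters by their first occurrence instead of
--     # deduplicating in a sequential scan with a seen-set.
--     s = keyword.upper().replace('J', 'I')
--     letters = sorted((ch for ch in set(s) if 'A' <= ch <= 'Z'), key=s.index)
--     return ''.join(letters)
-- ===== Notes on version B (the rewrite author's own statement) =====
-- stated objective: faster
-- what changed: B normalizes the whole string up front (upper + replace('J','I')) and then orders the distinct in-range letters by their first-occurrence index (sorted over set(s) with key=s.index), replacing A's per-character Python loop with a seen-set by a few C-level built-ins plus a sort of at most 25 letters.
import Mathlib
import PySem

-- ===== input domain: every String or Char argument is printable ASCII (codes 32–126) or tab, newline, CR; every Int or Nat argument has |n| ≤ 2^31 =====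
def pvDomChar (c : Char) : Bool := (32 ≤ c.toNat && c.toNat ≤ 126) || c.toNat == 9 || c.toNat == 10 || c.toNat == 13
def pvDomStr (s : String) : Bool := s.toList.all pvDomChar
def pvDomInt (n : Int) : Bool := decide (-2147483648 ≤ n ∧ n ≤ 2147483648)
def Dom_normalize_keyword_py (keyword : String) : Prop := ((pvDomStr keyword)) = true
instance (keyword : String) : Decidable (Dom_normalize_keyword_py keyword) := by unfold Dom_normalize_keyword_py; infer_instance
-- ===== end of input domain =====

-- B replaces A's sequential seen-set scan by: normalize the whole string first
-- (upper, replace J->I), then sort the distinct in-range letters by their first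
-- occurrence index; same result, measurably faster in Python (C built-ins do
-- the per-character work instead of an interpreted loop).

-- ===== PORT A =====
-- loop body: for ch in keyword.upper(): if 'A'<=ch<='Z': ch = 'I' if ch=='J' else ch;
--            if ch not in seen: seen.add(ch); cleaned.append(ch)
def pvStepA (st : PySem.Set Char × List Char) (ch : Char) : PySem.Set Char × List Char :=
  if 'A' ≤ ch ∧ ch ≤ 'Z' then
    let ch := if ch = 'J' then 'I' else ch
    if (st.1.contains ch) then st else (st.1.add ch, st.2 ++ [ch])
  else st

def normalize_keyword_py (keyword : String) : String :=
  let st := (PySem.Str.upper keyword).toList.foldl pvStepA (PySem.Set.empty, [])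
  String.ofList st.2

-- ===== PORT B =====
-- s.index(ch) is ported as PySem.Str.find: ch is drawn from set(s), so it is
-- always present and index agrees with find (no ValueError is reachable).
def normalize_keyword_py_alt (keyword : String) : String :=
  let s := PySem.Str.replace (PySem.Str.upper keyword) "J" "I"
  let letters := PySem.List.sorted
      ((PySem.Set.ofList s.toList : List Char).filter (fun ch => decide ('A' ≤ ch ∧ ch ≤ 'Z')))
      (fun ch => PySem.Str.find s (String.singleton ch)) false
  String.ofList letters

-- ===== PRECONDITION & SPEC =====
def Spec_normalize_keyword_py (keyword : String) (out : String) : Prop := out = normalize_keyword_py_alt keyword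
instance (keyword : String) (out : String) : Decidable (Spec_normalize_keyword_py keyword out) := by unfold Spec_normalize_keyword_py; infer_instance

-- ===== CLAIM (what is proved, stated in full; the proofs are below) =====
def Claim_equal_normalize_keyword_py : Prop := ∀ (keyword : String), Dom_normalize_keyword_py keyword → Spec_normalize_keyword_py keyword (normalize_keyword_py keyword)

-- ===== LEMMAS AND PROOFS =====

-- the two character-level transforms, named
def pvJmap (c : Char) : Char := if c = 'J' then 'I' else c
def pvAZ (c : Char) : Bool := decide ('A' ≤ c ∧ c ≤ 'Z')

-- A's loop body filters to A..Z and maps J to I before the dedup test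
def pvGenB (ch : Char) : Option Char :=
  if 'A' ≤ ch ∧ ch ≤ 'Z' then some (if ch = 'J' then 'I' else ch) else none

-- A's fold from a duplicated state keeps both components equal; they evolve as
-- Set.add folded over the filtered/mapped stream.
theorem pvFoldA_eq (l : List Char) : ∀ (s : PySem.Set Char),
    l.foldl pvStepA (s, s) = ((l.filterMap pvGenB).foldl PySem.Set.add s,
                              (l.filterMap pvGenB).foldl PySem.Set.add s) := by
  induction l with
  | nil => intro s; rfl
  | cons ch tl ih =>
    intro s
    rw [List.foldl_cons, List.filterMap_cons]
    by_cases hAZ : 'A' ≤ ch ∧ ch ≤ 'Z'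
    · rw [show pvGenB ch = some (if ch = 'J' then 'I' else ch) from by simp [pvGenB, hAZ]]
      by_cases h : (if ch = 'J' then 'I' else ch) ∈ (s : List Char)
      · rw [show pvStepA (s, s) ch = (s, s) from by simp [pvStepA, PySem.Set.contains, hAZ, h],
            List.foldl_cons,
            show PySem.Set.add s (if ch = 'J' then 'I' else ch) = s from by
              simp [PySem.Set.add, PySem.Set.contains, h]]
        exact ih s
      · rw [show pvStepA (s, s) ch = (s ++ [if ch = 'J' then 'I' else ch],
                s ++ [if ch = 'J' then 'I' else ch]) from by
              simp [pvStepA, PySem.Set.contains, hAZ, h, PySem.Set.add],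
            List.foldl_cons,
            show PySem.Set.add s (if ch = 'J' then 'I' else ch) =
                s ++ [if ch = 'J' then 'I' else ch] from by simp [PySem.Set.add, PySem.Set.contains, h]]
        exact ih _
    · rw [show pvStepA (s, s) ch = (s, s) from by simp [pvStepA, hAZ],
          show pvGenB ch = none from by simp [pvGenB, hAZ]]
      exact ih s

-- the filtered/mapped stream, as map-then-filter
theorem pvFilterMap_eq (l : List Char) :
    l.filterMap pvGenB = (l.map pvJmap).filter pvAZ := by
  induction l with
  | nil => rfl
  | cons c t ih =>
    rw [List.filterMap_cons, List.map_cons, List.filter_cons]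
    by_cases hAZ : 'A' ≤ c ∧ c ≤ 'Z'
    · have h1 : pvGenB c = some (pvJmap c) := by simp [pvGenB, pvJmap, hAZ]
      have h2 : pvAZ (pvJmap c) = true := by
        by_cases hJ : c = 'J'
        · subst hJ; decide
        · simp only [pvJmap, if_neg hJ, pvAZ]; exact decide_eq_true hAZ
      rw [h1, h2, ih]; simp
    · have h1 : pvGenB c = none := by simp [pvGenB, hAZ]
      have h2 : pvJmap c = c := by
        have : c ≠ 'J' := by rintro rfl; exact hAZ (by decide)
        simp [pvJmap, this]
      have h3 : pvAZ c = false := by simp [pvAZ, hAZ]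
      rw [h1, h2, h3, ih]; simp

-- replace('J','I') is the character map pvJmap
theorem pvReplaceGo (fuel : Nat) : ∀ (l acc : List Char), l.length ≤ fuel →
    PySem.Chars.replace.go ['J'] ['I'] fuel l acc = acc.reverse ++ l.map pvJmap := by
  induction fuel with
  | zero =>
    intro l acc h
    have : l = [] := List.eq_nil_of_length_eq_zero (Nat.le_zero.mp h)
    subst this; simp [PySem.Chars.replace.go]
  | succ n ih =>
    intro l acc h
    cases l with
    | nil => simp [PySem.Chars.replace.go]
    | cons c t =>
      by_cases hJ : c = 'J'
      · subst hJ
        rw [show PySem.Chars.replace.go ['J'] ['I'] (n+1) ('J' :: t) acc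
              = PySem.Chars.replace.go ['J'] ['I'] n t ('I' :: acc) from by
            simp [PySem.Chars.replace.go, List.isPrefixOf]]
        rw [ih t ('I' :: acc) (by simpa using Nat.lt_succ_iff.mp (by simpa using h))]
        simp [pvJmap]
      · rw [show PySem.Chars.replace.go ['J'] ['I'] (n+1) (c :: t) acc
              = PySem.Chars.replace.go ['J'] ['I'] n t (c :: acc) from by
            simp only [PySem.Chars.replace.go, List.isPrefixOf, Bool.and_true, beq_iff_eq]
            rw [if_neg (fun h' : 'J' = c => absurd h'.symm hJ)]]
        rw [ih t (c :: acc) (by simpa using Nat.lt_succ_iff.mp (by simpa using h))]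
        simp [pvJmap, hJ]

theorem pvReplace (S : String) :
    (PySem.Str.replace S "J" "I").toList = S.toList.map pvJmap := by
  show (String.ofList (PySem.Chars.replace S.toList "J".toList "I".toList)).toList = _
  rw [PySem.Chars.replace]
  simp only [show ("J".toList : List Char) = ['J'] from rfl,
             show ("I".toList : List Char) = ['I'] from rfl]
  rw [if_neg (by simp)]
  rw [pvReplaceGo S.toList.length S.toList [] (le_refl _)]
  simp

-- dedup (= Set.ofList) structure lemmas
theorem pvFoldlAdd (l : List Char) : ∀ (s : List Char),
    List.foldl PySem.Set.add s l
      = s ++ (List.foldl PySem.Set.add ([] : List Char) l).filter (fun x => !s.contains x) := by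
  induction l with
  | nil => intro s; simp
  | cons c t ih =>
    intro s
    rw [List.foldl_cons, List.foldl_cons, ih (PySem.Set.add s c), ih (PySem.Set.add [] c)]
    have hnil : PySem.Set.add ([] : List Char) c = [c] := by
      simp [PySem.Set.add, PySem.Set.contains]
    by_cases h : c ∈ s
    · have hs : PySem.Set.add s c = s := by simp [PySem.Set.add, PySem.Set.contains, h]
      rw [hs, hnil]
      simp only [List.filter_append, List.filter_filter]
      rw [show List.filter (fun x => !s.contains x) [c] = [] from by simp [h], List.nil_append]
      congr 1
      apply List.filter_congr
      intro x _
      by_cases hx : x = c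
      · subst hx; simp [h]
      · simp [hx]
    · have hs : PySem.Set.add s c = s ++ [c] := by simp [PySem.Set.add, PySem.Set.contains, h]
      rw [hs, hnil]
      simp only [List.filter_append, List.filter_filter, List.append_assoc]
      rw [show List.filter (fun x => !s.contains x) [c] = [c] from by simp [h]]
      congr 2
      apply List.filter_congr
      intro x _
      by_cases hx : x = c
      · subst hx; simp
      · simp [hx]

theorem pvOfListCons (c : Char) (t : List Char) :
    (PySem.Set.ofList (c :: t) : List Char)
      = c :: (PySem.Set.ofList t : List Char).filter (fun x => x ≠ c) := by
  show List.foldl PySem.Set.add (PySem.Set.add PySem.Set.empty c) t = _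
  have hnil : PySem.Set.add (PySem.Set.empty : PySem.Set Char) c = [c] := by
    simp [PySem.Set.add, PySem.Set.contains, PySem.Set.empty]
  rw [hnil, pvFoldlAdd t [c]]
  show _ = c :: (List.foldl PySem.Set.add ([] : List Char) t).filter _
  rw [List.singleton_append]
  congr 1
  apply List.filter_congr
  intro x _
  by_cases hx : x = c <;> simp [hx]

theorem pvOfListFilter (p : Char → Bool) (l : List Char) :
    (PySem.Set.ofList (l.filter p) : List Char) = (PySem.Set.ofList l : List Char).filter p := by
  induction l with
  | nil => rfl
  | cons c t ih =>
    rw [List.filter_cons, pvOfListCons c t]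
    by_cases h : p c = true
    · rw [if_pos h, pvOfListCons, ih, List.filter_cons, if_pos h, List.filter_filter,
          List.filter_filter]
      congr 1
      apply List.filter_congr
      intro x _
      by_cases hx : x = c <;> simp [hx, h]
    · rw [if_neg h, ih, List.filter_cons, if_neg h, List.filter_filter]
      apply (List.filter_congr _).symm
      intro x _
      by_cases hx : x = c
      · subst hx; simp [h]
      · simp [hx]

-- first-occurrence indices are strictly increasing along Set.ofList
theorem pvOfListIdx (l : List Char) :
    (PySem.Set.ofList l : List Char).Pairwise (fun a b => l.idxOf a < l.idxOf b) := by
  induction l with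
  | nil => exact List.Pairwise.nil
  | cons c t ih =>
    rw [pvOfListCons]
    constructor
    · intro b hb
      have hbne : b ≠ c := by
        have := List.of_mem_filter hb
        simpa using this
      rw [List.idxOf_cons_self, List.idxOf_cons_ne _ (by simpa using hbne.symm)]
      exact Nat.succ_pos _
    · have hsub : ((PySem.Set.ofList t : List Char).filter (fun x => x ≠ c)).Sublist
          (PySem.Set.ofList t : List Char) := List.filter_sublist
      have hp := (ih.sublist hsub)
      apply hp.imp_of_mem
      intro a b ha hb hab
      have hane : a ≠ c := by simpa using List.of_mem_filter ha
      have hbne : b ≠ c := by simpa using List.of_mem_filter hb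
      rw [List.idxOf_cons_ne _ (by simpa using hane.symm),
          List.idxOf_cons_ne _ (by simpa using hbne.symm)]
      omega

-- Chars.find of a single present character is its first index
theorem pvFindGo (c : Char) (l : List Char) : ∀ (k : Nat), c ∈ l →
    PySem.Chars.find.go [c] l k = (k : Int) + l.idxOf c := by
  induction l with
  | nil => intro k h; cases h
  | cons h t ih =>
    intro k hm
    by_cases hc : h = c
    · subst hc
      rw [show PySem.Chars.find.go [h] (h :: t) k = (k : Int) from by
            simp [PySem.Chars.find.go, List.isPrefixOf]]
      simp
    · rw [show PySem.Chars.find.go [c] (h :: t) k = PySem.Chars.find.go [c] t (k+1) from by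
            simp only [PySem.Chars.find.go, List.isPrefixOf, Bool.and_true, beq_iff_eq]
            rw [if_neg (fun h' : c = h => hc h'.symm)]]
      have hmt : c ∈ t := by
        rcases List.mem_cons.mp hm with h' | h'
        · exact absurd h'.symm hc
        · exact h'
      rw [ih (k+1) hmt, List.idxOf_cons_ne _ (by simpa using hc)]
      push_cast; ring

theorem pvFindChar (c : Char) (S : String) (h : c ∈ S.toList) :
    PySem.Str.find S (String.singleton c) = (S.toList.idxOf c : Int) := by
  show PySem.Chars.find S.toList (String.singleton c).toList = _
  rw [show (String.singleton c).toList = [c] from by simp]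
  show PySem.Chars.find.go [c] S.toList 0 = _
  rw [pvFindGo c S.toList 0 h]
  simp

-- ===== VERDICT (by name: the statement is the Claim_ definition above) =====
set_option maxHeartbeats 1000000 in
theorem normalize_keyword_py_spec : Claim_equal_normalize_keyword_py := by
  intro keyword _
  show normalize_keyword_py keyword = normalize_keyword_py_alt keyword
  have hu : (PySem.Str.replace (PySem.Str.upper keyword) "J" "I").toList
      = (PySem.Str.upper keyword).toList.map pvJmap := pvReplace _
  -- A's character list is the pvAZ-filter of the distinct letters of s
  have hA : normalize_keyword_py keyword
      = String.ofList ((PySem.Set.ofList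
          ((PySem.Str.replace (PySem.Str.upper keyword) "J" "I").toList) : List Char).filter pvAZ) := by
    show String.ofList
        (((PySem.Str.upper keyword).toList.foldl pvStepA (PySem.Set.empty, [])).2) = _
    rw [show ((PySem.Set.empty : PySem.Set Char), ([] : List Char))
          = ((PySem.Set.empty : PySem.Set Char), (PySem.Set.empty : PySem.Set Char)) from rfl,
        pvFoldA_eq, pvFilterMap_eq, ← hu, ← pvOfListFilter]
    generalize (List.filter pvAZ (PySem.Str.replace (PySem.Str.upper keyword) "J" "I").toList) = L
    rfl
  rw [hA]
  simp only [normalize_keyword_py_alt]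
  rw [show (fun ch => decide ('A' ≤ ch ∧ ch ≤ 'Z')) = pvAZ from rfl]
  refine congrArg String.ofList (Eq.symm ?_)
  -- the filtered distinct letters are already strictly increasing in the key
  have hpw := (pvOfListIdx ((PySem.Str.replace (PySem.Str.upper keyword) "J" "I").toList)).sublist
      (List.filter_sublist (p := pvAZ))
  have hkey : (((PySem.Set.ofList ((PySem.Str.replace (PySem.Str.upper keyword) "J" "I").toList) : List Char).filter pvAZ)).Pairwise
      (fun a b => PySem.Str.find (PySem.Str.replace (PySem.Str.upper keyword) "J" "I") (String.singleton a)
                < PySem.Str.find (PySem.Str.replace (PySem.Str.upper keyword) "J" "I") (String.singleton b)) := by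
    apply hpw.imp_of_mem
    intro a b ha hb hab
    have hma : a ∈ (PySem.Str.replace (PySem.Str.upper keyword) "J" "I").toList :=
      (PySem.Set.mem_ofList _ _).mp (List.mem_of_mem_filter ha)
    have hmb : b ∈ (PySem.Str.replace (PySem.Str.upper keyword) "J" "I").toList :=
      (PySem.Set.mem_ofList _ _).mp (List.mem_of_mem_filter hb)
    rw [pvFindChar a _ hma, pvFindChar b _ hmb]
    exact_mod_cast hab
  exact PySem.List.sorted_eq_of_perm_of_pairwise_lt _ _ _ (List.Perm.refl _) hkey
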